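-- pv_equiv track=rewrite | github.com/sravez/dauphine | Info/06_Listes/py/E06_12.py | get_sum_of_first_longest_sublist
-- ===== SOURCE A (Python) =====
-- def get_sum_of_first_longest_sublist(lol):
--     l = 0
--     s = 0
--     for sl in lol:
--         if len(sl) > l:
--             l = len(sl)
--             s = sum(sl)
--     return s
-- ===== SOURCE B (Python) =====
-- def get_sum_of_first_longest_sublist(lol):
--     # Two staged passes: first compute the maximum length, then sum the
--     # first sublist attaining it.
--     if not lol:
--         return 0
--     longest = max(map(len, lol))
--     for sl in lol:
--         if len(sl) == longest:
--             return sum(sl)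
-- ===== Notes on version B (the rewrite author's own statement) =====
-- stated objective: alternative
-- what changed: Replaces A's single running-max loop (length accumulator plus conditional re-summing) by two staged passes: pass 1 computes the maximum sublist length, pass 2 scans for the first sublist of that length and sums it.
import Mathlib
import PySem

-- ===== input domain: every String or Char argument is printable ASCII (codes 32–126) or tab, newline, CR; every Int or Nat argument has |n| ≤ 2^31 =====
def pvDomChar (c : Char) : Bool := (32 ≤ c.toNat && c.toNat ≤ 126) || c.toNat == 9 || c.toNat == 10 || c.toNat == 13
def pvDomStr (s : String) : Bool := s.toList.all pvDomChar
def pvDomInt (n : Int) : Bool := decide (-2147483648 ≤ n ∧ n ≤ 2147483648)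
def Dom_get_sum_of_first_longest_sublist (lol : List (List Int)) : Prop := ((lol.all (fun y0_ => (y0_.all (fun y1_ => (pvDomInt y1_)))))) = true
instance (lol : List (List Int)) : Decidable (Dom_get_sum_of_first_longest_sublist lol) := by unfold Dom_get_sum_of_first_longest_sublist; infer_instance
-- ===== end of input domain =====

-- B: two staged passes (max length first, then sum the first sublist of that length) instead of A's single running-max loop; same cost, different decomposition.


-- ===== PORT A =====
def get_sum_of_first_longest_sublist (lol : List (List Int)) : Int :=
  (lol.foldl
    (fun (st : Int × Int) sl =>
      if (sl.length : Int) > st.1 then ((sl.length : Int), sl.sum) else st)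
    (0, 0)).2

-- ===== PORT B =====
-- the 'for sl in lol: if len(sl) == longest: return sum(sl)' loop of Source B
-- (the 0 at the end mirrors Python's fall-through, which is unreachable since longest is attained)
def pvFindSum (longest : Nat) : List (List Int) → Int
  | [] => 0
  | sl :: t => if sl.length == longest then sl.sum else pvFindSum longest t

def get_sum_of_first_longest_sublist_alt (lol : List (List Int)) : Int :=
  match lol with
  | [] => 0
  | h :: t =>
    let longest := t.foldl (fun m sl => max m sl.length) h.length  -- max(map(len, lol))
    pvFindSum longest (h :: t)

-- ===== PRECONDITION & SPEC =====
def Spec_get_sum_of_first_longest_sublist (lol : List (List Int)) (out : Int) : Prop := out = get_sum_of_first_longest_sublist_alt lol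
instance (lol : List (List Int)) (out : Int) : Decidable (Spec_get_sum_of_first_longest_sublist lol out) := by unfold Spec_get_sum_of_first_longest_sublist; infer_instance

-- ===== CLAIM (what is proved, stated in full; the proofs are below) =====
def Claim_equal_get_sum_of_first_longest_sublist : Prop := ∀ (lol : List (List Int)), Dom_get_sum_of_first_longest_sublist lol → Spec_get_sum_of_first_longest_sublist lol (get_sum_of_first_longest_sublist lol)

-- ===== LEMMAS AND PROOFS =====

-- Nat-state reference version of A's fold.
def pvRef : List (List Int) → Nat → Int → Nat × Int
  | [], l, s => (l, s)
  | x :: t, l, s => if l < x.length then pvRef t x.length x.sum else pvRef t l s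

theorem pvFoldA (t : List (List Int)) (l : Nat) (s : Int) :
    t.foldl
      (fun (st : Int × Int) sl =>
        if (sl.length : Int) > st.1 then ((sl.length : Int), sl.sum) else st)
      ((l : Int), s)
    = (((pvRef t l s).1 : Int), (pvRef t l s).2) := by
  induction t generalizing l s with
  | nil => rfl
  | cons x t ih =>
      simp only [List.foldl_cons, pvRef]
      by_cases h : l < x.length
      · have : ((x.length : Int) > (l : Int)) := by exact_mod_cast h
        simp [h, this, ih]
      · have : ¬ ((x.length : Int) > (l : Int)) := by
          simp only [gt_iff_lt]; exact_mod_cast h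
        simp [h, this, ih]

theorem pv_le_foldl_max (t : List (List Int)) (l : Nat) :
    l ≤ t.foldl (fun m sl => max m sl.length) l := by
  induction t generalizing l with
  | nil => simp
  | cons x t ih =>
      simp only [List.foldl_cons]
      exact le_trans (le_max_left _ _) (ih _)

theorem pvRef_spec (t : List (List Int)) (l : Nat) (s : Int) :
    pvRef t l s =
      (if t.foldl (fun m sl => max m sl.length) l = l then (l, s)
       else (t.foldl (fun m sl => max m sl.length) l,
             pvFindSum (t.foldl (fun m sl => max m sl.length) l) t)) := by
  induction t generalizing l s with
  | nil => simp [pvRef]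
  | cons x t ih =>
      simp only [pvRef, List.foldl_cons]
      by_cases h : l < x.length
      · have hml : max l x.length = x.length := by omega
        rw [hml, if_pos h, ih]
        set M := t.foldl (fun m sl => max m sl.length) x.length with hM
        have hxM : x.length ≤ M := pv_le_foldl_max t x.length
        by_cases hMx : M = x.length
        · have hxl : ¬ (x.length = l) := by omega
          simp [hMx, hxl, pvFindSum]
        · have hMl : ¬ (M = l) := by omega
          have : ¬ (x.length == M) = true := by simpa using fun e => hMx e.symm
          simp [hMx, hMl, pvFindSum, this]
      · have hml : max l x.length = l := by omega
        rw [hml, if_neg h, ih]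
        set M := t.foldl (fun m sl => max m sl.length) l with hM
        have hlM : l ≤ M := pv_le_foldl_max t l
        by_cases hMl : M = l
        · simp [hMl]
        · have : ¬ (x.length == M) = true := by
            simp only [beq_iff_eq]; omega
          simp [hMl, pvFindSum, this]

theorem get_sum_of_first_longest_sublist_spec : Claim_equal_get_sum_of_first_longest_sublist := by
  intro lol _
  unfold Spec_get_sum_of_first_longest_sublist
  unfold get_sum_of_first_longest_sublist get_sum_of_first_longest_sublist_alt
  cases lol with
  | nil => rfl
  | cons h t =>
      rw [show ((0 : Int), (0 : Int)) = (((0 : Nat) : Int), (0 : Int)) from rfl,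
          pvFoldA, pvRef_spec]
      simp only [List.foldl_cons, Nat.zero_max]
      set M := t.foldl (fun m sl => max m sl.length) h.length with hM
      have hhM : h.length ≤ M := pv_le_foldl_max t h.length
      by_cases h0 : M = 0
      · have hh : h.length = 0 := by omega
        have hnil : h = [] := List.eq_nil_of_length_eq_zero hh
        simp [h0, hnil, pvFindSum]
      · simp [h0, pvFindSum]
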